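-- pv_equiv track=rewrite | github.com/Kai124816/Class-Encore-Fall | week_2/problems.py | mystery4
-- ===== SOURCE A (Python) =====
-- def mystery4(n):
--     total = 0
--     for i in range(1, n + 1):
--         if i % 2 == 0:
--             if i % 4 == 0:
--                 total += i
--             else:
--                 total -= i
--         else:
--             total += 2
--     return total
-- ===== SOURCE B (Python) =====
-- def mystery4(n):
--     if n < 0:
--         n = 0
--     odds = (n + 1) // 2
--     k = n // 4
--     m = (n + 2) // 4
--     return 2 * odds + 2 * k * (k + 1) - 2 * m * m
-- ===== Notes on version B (the rewrite author's own statement) =====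
-- stated objective: faster
-- what changed: Replaced the O(n) loop with O(1) closed-form arithmetic-series formulas: count of odd i, sum of multiples of 4, and sum of i ≡ 2 (mod 4) up to n.
import Mathlib
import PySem

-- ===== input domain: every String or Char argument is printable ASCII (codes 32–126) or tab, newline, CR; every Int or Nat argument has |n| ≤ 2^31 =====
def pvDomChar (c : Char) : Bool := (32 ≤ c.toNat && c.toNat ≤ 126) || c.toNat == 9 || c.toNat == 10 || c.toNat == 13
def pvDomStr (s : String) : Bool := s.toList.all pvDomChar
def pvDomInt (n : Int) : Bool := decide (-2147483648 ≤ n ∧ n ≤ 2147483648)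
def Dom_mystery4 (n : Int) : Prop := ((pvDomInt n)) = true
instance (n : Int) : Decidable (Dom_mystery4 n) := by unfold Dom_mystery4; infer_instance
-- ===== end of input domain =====

-- B replaces A's O(n) loop by O(1) closed-form arithmetic-series formulas per residue class.

-- ===== PORT A =====
def mystery4 (n : Int) : Int :=
  (PySem.List.pyRange 1 (n + 1) 1).foldl
    (fun total i =>
      if PySem.Int.mod i 2 = 0 then
        if PySem.Int.mod i 4 = 0 then total + i else total - i
      else total + 2)
    0

-- ===== PORT B =====
def mystery4_alt (n : Int) : Int :=
  let n' := if n < 0 then 0 else n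
  let odds := PySem.Int.floordiv (n' + 1) 2
  let k := PySem.Int.floordiv n' 4
  let m := PySem.Int.floordiv (n' + 2) 4
  2 * odds + 2 * k * (k + 1) - 2 * m * m

-- ===== PRECONDITION & SPEC =====
def Spec_mystery4 (n : Int) (out : Int) : Prop := out = mystery4_alt n
instance (n : Int) (out : Int) : Decidable (Spec_mystery4 n out) := by unfold Spec_mystery4; infer_instance

-- ===== CLAIM (what is proved, stated in full; the proofs are below) =====
def Claim_equal_mystery4 : Prop := ∀ (n : Int), Dom_mystery4 n → Spec_mystery4 n (mystery4 n)

-- ===== LEMMAS AND PROOFS =====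

def pvF (N : Nat) : Int :=
  2 * (((N + 1) / 2 : Nat) : Int)
    + 2 * ((N / 4 : Nat) : Int) * (((N / 4 : Nat) : Int) + 1)
    - 2 * (((N + 2) / 4 : Nat) : Int) * (((N + 2) / 4 : Nat) : Int)

lemma pv_loop_eq (N : Nat) :
    ((List.range N).map (fun k : Nat => (1 : Int) + k)).foldl
      (fun total i =>
        if PySem.Int.mod i 2 = 0 then
          if PySem.Int.mod i 4 = 0 then total + i else total - i
        else total + 2)
      0 = pvF N := by
  induction N with
  | zero => simp [pvF]
  | succ N ih =>
    rw [List.range_succ, List.map_append, List.foldl_append, ih]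
    simp only [List.map, List.foldl]
    rw [PySem.Int.mod_eq_emod_of_pos (by norm_num : (0:Int) < 2),
        PySem.Int.mod_eq_emod_of_pos (by norm_num : (0:Int) < 4)]
    unfold pvF
    obtain ⟨q, r, hrlt, rfl⟩ : ∃ q r, r < 4 ∧ N = 4 * q + r :=
      ⟨N / 4, N % 4, by omega, by omega⟩
    interval_cases r
    · rw [if_neg (by push_cast; omega)]
      push_cast
      rw [show (4*(q:Int)+0+1)/2 = 2*q from by omega,
          show (4*(q:Int)+0+1+1)/2 = 2*q+1 from by omega,
          show (4*(q:Int)+0)/4 = q from by omega,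
          show (4*(q:Int)+0+1)/4 = q from by omega,
          show (4*(q:Int)+0+2)/4 = q from by omega,
          show (4*(q:Int)+0+1+2)/4 = q from by omega]
      ring
    · rw [if_pos (by push_cast; omega), if_neg (by push_cast; omega)]
      push_cast
      rw [show (4*(q:Int)+1+1)/2 = 2*q+1 from by omega,
          show (4*(q:Int)+1+1+1)/2 = 2*q+1 from by omega,
          show (4*(q:Int)+1)/4 = q from by omega,
          show (4*(q:Int)+1+1)/4 = q from by omega,
          show (4*(q:Int)+1+2)/4 = q from by omega,
          show (4*(q:Int)+1+1+2)/4 = q+1 from by omega]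
      ring
    · rw [if_neg (by push_cast; omega)]
      push_cast
      rw [show (4*(q:Int)+2+1)/2 = 2*q+1 from by omega,
          show (4*(q:Int)+2+1+1)/2 = 2*q+2 from by omega,
          show (4*(q:Int)+2)/4 = q from by omega,
          show (4*(q:Int)+2+1)/4 = q from by omega,
          show (4*(q:Int)+2+2)/4 = q+1 from by omega,
          show (4*(q:Int)+2+1+2)/4 = q+1 from by omega]
      ring
    · rw [if_pos (by push_cast; omega), if_pos (by push_cast; omega)]
      push_cast
      rw [show (4*(q:Int)+3+1)/2 = 2*q+2 from by omega,
          show (4*(q:Int)+3+1+1)/2 = 2*q+2 from by omega,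
          show (4*(q:Int)+3)/4 = q from by omega,
          show (4*(q:Int)+3+1)/4 = q+1 from by omega,
          show (4*(q:Int)+3+2)/4 = q+1 from by omega,
          show (4*(q:Int)+3+1+2)/4 = q+1 from by omega]
      ring

theorem mystery4_spec : Claim_equal_mystery4 := by
  intro n _
  unfold Spec_mystery4 mystery4 mystery4_alt
  rw [PySem.List.pyRange_one]
  have h1 : (n + 1 - 1).toNat = n.toNat := by omega
  rw [h1, pv_loop_eq]
  unfold pvF
  by_cases hn : n < 0
  · simp only [hn, if_pos]
    have : n.toNat = 0 := by omega
    rw [this]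
    simp [PySem.Int.floordiv]
  · simp only [hn, if_false]
    rw [PySem.Int.floordiv_eq_ediv_of_pos (by norm_num),
        PySem.Int.floordiv_eq_ediv_of_pos (by norm_num),
        PySem.Int.floordiv_eq_ediv_of_pos (by norm_num)]
    have hn' : (n.toNat : Int) = n := by omega
    push_cast
    rw [hn']
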